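-- pv_equiv track=rewrite | github.com/ashlilii/CS313E | OfficeSpace.py | contested_space
-- ===== SOURCE A (Python) =====
-- def contested_space (bldg):
--     x = len(bldg[0])
--     y = len(bldg)
--     count = 0
--
--     for i in range(y):
--         for n in range(x):
--             if bldg[i][n] != 0 and bldg[i][n] != 1:
--                 count += 1
--
--     return count
-- ===== SOURCE B (Python) =====
-- def contested_space(bldg):
--     x = len(bldg[0])
--     y = len(bldg)
--     return x * y - sum(row[:x].count(0) + row[:x].count(1) for row in bldg)
-- ===== Notes on version B (the rewrite author's own statement) =====
-- stated objective: alternative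
-- what changed: B counts the complement: total cells x*y minus per-row tallies of 0s and 1s via row[:x].count, instead of A's nested index loops testing each cell against 0 and 1.
import Mathlib
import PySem

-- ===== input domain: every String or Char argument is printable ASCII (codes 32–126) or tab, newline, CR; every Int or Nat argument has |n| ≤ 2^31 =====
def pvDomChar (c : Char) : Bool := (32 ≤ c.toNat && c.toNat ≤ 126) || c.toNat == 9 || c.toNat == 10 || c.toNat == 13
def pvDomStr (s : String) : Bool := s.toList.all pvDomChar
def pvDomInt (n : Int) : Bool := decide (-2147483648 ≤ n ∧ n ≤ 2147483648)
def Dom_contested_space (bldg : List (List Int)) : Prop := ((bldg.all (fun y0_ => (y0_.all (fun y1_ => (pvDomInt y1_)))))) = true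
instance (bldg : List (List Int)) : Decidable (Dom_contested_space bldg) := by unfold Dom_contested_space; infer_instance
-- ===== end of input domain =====

-- B counts the complement (total cells minus 0/1 tallies) instead of testing each cell; alternative decomposition, not claimed faster.

-- ===== PORT A =====
def contested_space (bldg : List (List Int)) : Int :=
  let x : Int := (((PySem.List.pyGet? bldg 0).getD []).length : Int)
  let y : Int := (bldg.length : Int)
  (PySem.List.pyRange 0 y 1).foldl (fun count i =>
    (PySem.List.pyRange 0 x 1).foldl (fun count n =>
      if PySem.List.pyGetD (PySem.List.pyGetD bldg i []) n 0 ≠ 0 ∧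
         PySem.List.pyGetD (PySem.List.pyGetD bldg i []) n 0 ≠ 1
      then count + 1 else count) count) 0

-- ===== PORT B =====
def contested_space_alt (bldg : List (List Int)) : Int :=
  let x : Int := (((PySem.List.pyGet? bldg 0).getD []).length : Int)
  let y : Int := (bldg.length : Int)
  x * y - (bldg.map (fun row =>
      ((PySem.List.count (PySem.List.slice row none (some x)) 0 : Int)
        + (PySem.List.count (PySem.List.slice row none (some x)) 1 : Int)))).sum

-- ===== PRECONDITION & SPEC =====
-- Pre_ excludes the empty grid and grids with a row shorter than the first row: there A raises IndexError.
def Pre_contested_space (bldg : List (List Int)) : Prop :=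
  bldg ≠ [] ∧ ∀ r ∈ bldg, (bldg.headD []).length ≤ r.length
instance (bldg : List (List Int)) : Decidable (Pre_contested_space bldg) := by unfold Pre_contested_space; infer_instance

def pvWitness_contested_space : List (List Int) := [[0, 2, 1], [5, 0, -3]]

def Spec_contested_space (bldg : List (List Int)) (out : Int) : Prop := out = contested_space_alt bldg
instance (bldg : List (List Int)) (out : Int) : Decidable (Spec_contested_space bldg out) := by unfold Spec_contested_space; infer_instance

-- ===== CLAIM (what is proved, stated in full; the proofs are below) =====
def Claim_equal_contested_space : Prop := ∀ (bldg : List (List Int)), Dom_contested_space bldg → Pre_contested_space bldg → Spec_contested_space bldg (contested_space bldg)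

-- ===== LEMMAS AND PROOFS =====

-- per-row: number of cells ≠0 and ≠1 = length − count 0 − count 1
theorem row_countP (row : List Int) :
    ((row.countP (fun v => decide (v ≠ 0 ∧ v ≠ 1))) : Int)
      = (row.length : Int) - (row.count 0 : Int) - (row.count 1 : Int) := by
  induction row with
  | nil => simp
  | cons v t ih =>
    by_cases h0 : v = 0 <;> by_cases h1 : v = 1 <;>
      simp [h0, h1] at ih ⊢ <;> omega

-- A's inner loop over range(x) on a row of length ≥ x only sees the first x cells
theorem row_fold (x : Nat) (row : List Int) (hx : x ≤ row.length) (c : Int) :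
    (PySem.List.pyRange 0 (x : Int) 1).foldl (fun count n =>
        if PySem.List.pyGetD row n 0 ≠ 0 ∧ PySem.List.pyGetD row n 0 ≠ 1
        then count + 1 else count) c
      = c + ((x : Int) - (((row.take x).count 0 : Int) + ((row.take x).count 1 : Int))) := by
  have key := PySem.List.foldl_congr_mem (PySem.List.pyRange 0 (x : Int) 1)
      (fun count n => if PySem.List.pyGetD row n 0 ≠ 0 ∧ PySem.List.pyGetD row n 0 ≠ 1
        then count + 1 else count)
      (fun count n => if PySem.List.pyGetD (row.take x) n 0 ≠ 0 ∧ PySem.List.pyGetD (row.take x) n 0 ≠ 1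
        then count + 1 else count) c
      (by
        intro acc n hn
        rw [PySem.List.mem_pyRange_one] at hn
        have hn1 : (0:Int) ≤ n := hn.1
        have hn2 : n < (row.length : Int) := lt_of_lt_of_le hn.2 (by exact_mod_cast hx)
        have hn3 : n < ((row.take x).length : Int) := by
          rw [List.length_take]; push_cast; omega
        have hgl : PySem.List.pyGetD row n 0 = PySem.List.pyGetD (row.take x) n 0 := by
          rw [PySem.List.pyGetD_eq_getElem row 0 hn1 hn2,
              PySem.List.pyGetD_eq_getElem (row.take x) 0 hn1 hn3,
              List.getElem_take]
        simp only [hgl])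
  rw [key]
  have hlen : ((row.take x).length : Int) = (x : Int) := by
    rw [List.length_take]; push_cast; omega
  rw [← hlen,
      PySem.List.foldl_pyRange_zero_pyGetD' (row.take x) 0
        (fun count v => if v ≠ 0 ∧ v ≠ 1 then count + 1 else count) c,
      PySem.List.foldl_ite_add_one (fun v => v ≠ 0 ∧ v ≠ 1) (row.take x) c,
      row_countP]
  ring

-- A's outer loop, as total cells minus the 0/1 tallies of the x-wide row prefixes
theorem outer_fold (x : Nat) (L : List (List Int)) (h : ∀ r ∈ L, x ≤ r.length) (c : Int) :
    L.foldl (fun count row => (PySem.List.pyRange 0 (x : Int) 1).foldl (fun count n =>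
        if PySem.List.pyGetD row n 0 ≠ 0 ∧ PySem.List.pyGetD row n 0 ≠ 1
        then count + 1 else count) count) c
      = c + ((x : Int) * (L.length : Int)
          - (L.map (fun row => (((row.take x).count 0 : Int) + ((row.take x).count 1 : Int)))).sum) := by
  induction L generalizing c with
  | nil => simp
  | cons r t ih =>
    rw [List.foldl_cons, row_fold x r (h r (by simp)) c,
        ih (fun r hm => h r (by simp [hm]))]
    simp
    ring

theorem contested_space_spec : Claim_equal_contested_space := by
  intro bldg _ hpre
  obtain ⟨hne, hrect⟩ := hpre
  obtain ⟨r0, rest, rfl⟩ := List.exists_cons_of_ne_nil hne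
  have h' : ∀ r ∈ r0 :: rest, r0.length ≤ r.length :=
    fun r hm => by simpa [List.headD] using hrect r hm
  show contested_space (r0 :: rest) = contested_space_alt (r0 :: rest)
  unfold contested_space contested_space_alt
  simp only [PySem.List.pyGet?_zero_cons, Option.getD_some]
  rw [PySem.List.foldl_pyRange_zero_pyGetD' (r0 :: rest) []
      (fun count row => (PySem.List.pyRange 0 (r0.length : Int) 1).foldl (fun count n =>
        if PySem.List.pyGetD row n 0 ≠ 0 ∧ PySem.List.pyGetD row n 0 ≠ 1
        then count + 1 else count) count) 0]
  rw [outer_fold r0.length (r0 :: rest) h' 0]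
  simp [PySem.List.count_eq, PySem.List.slice_to]

-- ===== VERDICT (by name: the statement is the Claim_ definition above) =====
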